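-- pv_equiv track=rewrite | github.com/SevkavTV/Lab0_Task1 | skyscrapers.py | check_uniqueness_in_rows
-- ===== SOURCE A (Python) =====
-- def check_uniqueness_in_rows(board: list):
--     """
--     Check buildings of unique height in each row.
--
--     Return True if buildings in a row have unique length, False otherwise.
--
--     >>> check_uniqueness_in_rows(['***21**', '412453*', '423145*', '*543215',\
-- '*35214*', '*41532*', '*2*1***'])
--     True
--     >>> check_uniqueness_in_rows(['***21**', '452453*', '423145*', '*543215',\
-- '*35214*', '*41532*', '*2*1***'])
--     False
--     >>> check_uniqueness_in_rows(['***21**', '412453*', '423145*', '*553215',\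
-- '*35214*', '*41532*', '*2*1***'])
--     False
--     """
--     for index, line in enumerate(board):
--         if index not in (0, len(board) - 1):
--             board_line = line[1:-1]
--             for elem in board_line:
--                 if board_line.count(elem) > 1:
--                     return False
--
--     return True
-- ===== SOURCE B (Python) =====
-- def check_uniqueness_in_rows(board: list):
--     def row_ok(line):
--         s = sorted(line[1:-1])
--         return all(a != b for a, b in zip(s, s[1:]))
--     return all(map(row_ok, board[1:-1]))
-- ===== Notes on version B (the rewrite author's own statement) =====
-- stated objective: alternative
-- what changed: B drops the enumerate/index-guard loop for a slice board[1:-1] of the interior rows and, per row, replaces the repeated count() scans by sorting the row and requiring all adjacent pairs distinct.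
import Mathlib
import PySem

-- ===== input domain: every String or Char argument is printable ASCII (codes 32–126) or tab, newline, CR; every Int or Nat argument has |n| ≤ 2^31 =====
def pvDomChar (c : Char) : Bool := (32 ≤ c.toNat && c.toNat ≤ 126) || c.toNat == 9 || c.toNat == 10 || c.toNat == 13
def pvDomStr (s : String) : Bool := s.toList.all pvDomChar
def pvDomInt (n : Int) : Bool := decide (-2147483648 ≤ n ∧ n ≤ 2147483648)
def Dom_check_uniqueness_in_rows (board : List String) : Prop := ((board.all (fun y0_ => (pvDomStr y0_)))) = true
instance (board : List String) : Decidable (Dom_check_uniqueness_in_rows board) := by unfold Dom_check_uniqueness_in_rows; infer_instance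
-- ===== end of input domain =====

-- B checks the interior slice board[1:-1] with all(), sorting each row and requiring adjacent pairs distinct,
-- instead of A's enumerate/index-guard loop with per-element count() scans.


-- ===== PORT A =====
-- early 'return False' inside the loops becomes List.any; line[1:-1] is PySem.List.slice on the chars
def check_uniqueness_in_rows (board : List String) : Bool :=
  !((PySem.List.enumerate board 0).any (fun p =>
      if p.1 = 0 ∨ p.1 = (board.length : Int) - 1 then false
      else
        let bl := PySem.List.slice p.2.toList (some 1) (some (-1))
        bl.any (fun e => 1 < bl.count e)))

-- ===== PORT B =====
-- helper row_ok: sorted interior of the line, all adjacent pairs distinct (zip(s, s[1:]))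
def pvRowOk (line : String) : Bool :=
  let s := PySem.List.sorted (PySem.List.slice line.toList (some 1) (some (-1))) (fun x => x) false
  (s.zip s.tail).all (fun q => q.1 != q.2)

-- all(map(row_ok, board[1:-1]))
def check_uniqueness_in_rows_alt (board : List String) : Bool :=
  ((PySem.List.slice board (some 1) (some (-1))).map pvRowOk).all (fun b => b)

-- ===== PRECONDITION & SPEC =====
def Spec_check_uniqueness_in_rows (board : List String) (out : Bool) : Prop := out = check_uniqueness_in_rows_alt board
instance (board : List String) (out : Bool) : Decidable (Spec_check_uniqueness_in_rows board out) := by unfold Spec_check_uniqueness_in_rows; infer_instance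

-- ===== CLAIM =====
def Claim_equal_check_uniqueness_in_rows : Prop := ∀ (board : List String), Dom_check_uniqueness_in_rows board → Spec_check_uniqueness_in_rows board (check_uniqueness_in_rows board)

-- ===== LEMMAS AND PROOFS =====

-- A's per-row test: some element occurs more than once ↔ the row is not Nodup
theorem any_count_eq_not_nodup (l : List Char) :
    (l.any (fun e => 1 < l.count e)) = !decide l.Nodup := by
  by_cases h : l.Nodup
  · simp [h]
    intro e _
    exact List.nodup_iff_count_le_one.mp h e
  · simp [h, List.any_eq_true]
    rw [List.nodup_iff_count_le_one] at h
    push Not at h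
    obtain ⟨e, he⟩ := h
    exact ⟨e, List.count_pos_iff.mp (by omega), by omega⟩

-- B's per-row test on a (≤)-sorted list: all adjacent pairs distinct ↔ Nodup
theorem adj_distinct_eq_nodup (s : List Char) (hs : s.Pairwise (· ≤ ·)) :
    ((s.zip s.tail).all (fun q => q.1 != q.2)) = decide s.Nodup := by
  induction s with
  | nil => simp
  | cons a t ih =>
    cases t with
    | nil => simp
    | cons b u =>
      have htail : (b :: u).Pairwise (· ≤ ·) := hs.tail
      by_cases hab : a = b
      · subst hab
        simp [List.zip]
      · have hpc := List.pairwise_cons.mp hs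
        have hnotmem : a ∉ b :: u := by
          intro hmem
          rcases List.mem_cons.mp hmem with h | h
          · exact hab h
          · have h1 : a ≤ b := hpc.1 b (by simp)
            have h2 : b ≤ a := (List.pairwise_cons.mp htail).1 a h
            exact hab (le_antisymm h1 h2)
        have := ih htail
        simp only [List.zip, List.tail_cons] at this ⊢
        rw [List.zipWith_cons_cons, List.all_cons, this]
        simp [List.nodup_cons, hnotmem, hab]

-- per-row: A's duplicate test is the negation of B's row_ok
theorem row_test_eq (line : String) :
    ((PySem.List.slice line.toList (some 1) (some (-1))).any
        (fun e => 1 < (PySem.List.slice line.toList (some 1) (some (-1))).count e)) =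
      !pvRowOk line := by
  set l := PySem.List.slice line.toList (some 1) (some (-1)) with hl
  have hperm : (PySem.List.sorted l (fun x => x) false).Perm l := PySem.List.sorted_perm l _ _
  have hs : (PySem.List.sorted l (fun x => x) false).Pairwise (· ≤ ·) := by
    have := PySem.List.sorted_pairwise l (fun x => x)
    simpa using this
  rw [any_count_eq_not_nodup]
  unfold pvRowOk
  rw [← hl, adj_distinct_eq_nodup _ hs]
  simp [hperm.nodup_iff]

-- board[1:-1] is tail.dropLast
theorem slice_one_neg_one {α : Type} (xs : List α) :
    PySem.List.slice xs (some 1) (some (-1)) = xs.tail.dropLast := by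
  unfold PySem.List.slice
  simp [PySem.List.clampIdx]
  rcases xs with _ | ⟨x, rest⟩
  · simp
  · simp [List.dropLast_eq_take, List.tail]

-- outer loops agree
theorem outer_eq (board : List String) (bad : String → Bool) :
    ((PySem.List.enumerate board 0).any (fun p =>
        if p.1 = 0 ∨ p.1 = (board.length : Int) - 1 then false else bad p.2)) =
      (board.tail.dropLast).any bad := by
  rw [Bool.eq_iff_iff]
  simp only [List.any_eq_true]
  constructor
  · rintro ⟨p, hp, hbad⟩
    rw [PySem.List.mem_enumerate_iff] at hp
    obtain ⟨k, hk, rfl⟩ := hp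
    simp only [zero_add] at hbad
    split at hbad
    · exact absurd hbad (by simp)
    · rename_i hguard
      have hk0 : k ≠ 0 := by intro h; exact hguard (Or.inl (by simp [h]))
      have hklast : k ≠ board.length - 1 := by
        intro h; exact hguard (Or.inr (by subst h; omega))
      obtain ⟨j, rfl⟩ : ∃ j, k = j + 1 := ⟨k - 1, by omega⟩
      refine ⟨board[j + 1], ?_, hbad⟩
      have hjlen : j < board.tail.dropLast.length := by
        simp [List.length_tail, List.length_dropLast]; omega
      refine List.mem_iff_getElem.mpr ⟨j, hjlen, ?_⟩
      simp [List.getElem_dropLast, List.getElem_tail]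
  · rintro ⟨x, hx, hbad⟩
    obtain ⟨j, hj, rfl⟩ := List.mem_iff_getElem.mp hx
    have hjlen : j < board.length - 1 - 1 := by
      simpa [List.length_tail, List.length_dropLast] using hj
    refine ⟨((j + 1 : Nat), board[j + 1]), ?_, ?_⟩
    · rw [PySem.List.mem_enumerate_iff]
      exact ⟨j + 1, by omega, by simp⟩
    · have hguard : ¬(((j + 1 : Nat) : Int) = 0 ∨ ((j + 1 : Nat) : Int) = (board.length : Int) - 1) := by
        push_cast; omega
      simp only [hguard, if_false]
      simpa [List.getElem_dropLast, List.getElem_tail] using hbad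

-- ===== VERDICT =====
theorem check_uniqueness_in_rows_spec : Claim_equal_check_uniqueness_in_rows := by
  intro board _
  unfold Spec_check_uniqueness_in_rows check_uniqueness_in_rows check_uniqueness_in_rows_alt
  have h1 : ((PySem.List.enumerate board 0).any (fun p =>
      if p.1 = 0 ∨ p.1 = (board.length : Int) - 1 then false
      else
        let bl := PySem.List.slice p.2.toList (some 1) (some (-1))
        bl.any (fun e => 1 < bl.count e))) =
      ((PySem.List.enumerate board 0).any (fun p =>
      if p.1 = 0 ∨ p.1 = (board.length : Int) - 1 then false else !pvRowOk p.2)) := by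
    refine congrArg _ ?_
    funext p
    split
    · rfl
    · exact row_test_eq p.2
  rw [h1, outer_eq board (fun s => !pvRowOk s), slice_one_neg_one]
  rw [Bool.eq_iff_iff]
  simp [List.all_eq_true, -List.map_tail, -List.map_dropLast]
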